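-- pv_equiv track=rewrite | github.com/chandankmishra/lang | python/iview/g19/g_longest_word.py | helper
-- ===== SOURCE A (Python) =====
-- def helper(num_set, start, max_len):
--     n = len(start)
--     if n == max_len:
--         return n, start  # 3 , ‘art’
--
--     max_length = n #2
--     result = start  # ‘at’
--     for i in range(n+1):
--         for ch in "abcdefghijklmnopqrstuvwxyz":
--             new_word = start[:i] + ch + start[i:]     # ‘a’ + ‘a’ => ‘aa’
--             if new_word not in num_set:
--                 continue
--
--             ret, ret_word = helper(num_set, new_word, max_len) # ’am’
--             if ret > max_length:
--                 max_length = ret    # 3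
--                 result = ret_word    # ’art’
--
--     return max_length, result
-- ===== SOURCE B (Python) =====
-- def helper(num_set, start, max_len):
--     # Bottom-up DP: process set words from longest length to shortest, computing each
--     # word's best reachable extension once from a table of already-finished longer words.
--     words = set(num_set)
--     top = 0
--     for w in num_set:
--         top = max(top, len(w))
--     table = {}
--     for level in range(top, len(start), -1):
--         for w in num_set:
--             if len(w) == level:
--                 table[w] = _best(words, max_len, table, w)
--     return _best(words, max_len, table, start)
--
--
-- def _best(words, max_len, table, w):
--     n = len(w)
--     if n == max_len:
--         return n, w
--     best = (n, w)
--     for i in range(n + 1):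
--         for ch in "abcdefghijklmnopqrstuvwxyz":
--             nw = w[:i] + ch + w[i:]
--             if nw in words:
--                 r = table[nw]
--                 if r[0] > best[0]:
--                     best = r
--     return best
-- ===== Notes on version B (the rewrite author's own statement) =====
-- stated objective: alternative
-- what changed: B replaces A's top-down re-exploring recursion by a bottom-up, non-recursive DP: set words are processed level by level from the longest length down to len(start)+1, and each word's best extension is computed exactly once from a dict of already-finished longer words (hash-set membership instead of list scans).
import Mathlib
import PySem

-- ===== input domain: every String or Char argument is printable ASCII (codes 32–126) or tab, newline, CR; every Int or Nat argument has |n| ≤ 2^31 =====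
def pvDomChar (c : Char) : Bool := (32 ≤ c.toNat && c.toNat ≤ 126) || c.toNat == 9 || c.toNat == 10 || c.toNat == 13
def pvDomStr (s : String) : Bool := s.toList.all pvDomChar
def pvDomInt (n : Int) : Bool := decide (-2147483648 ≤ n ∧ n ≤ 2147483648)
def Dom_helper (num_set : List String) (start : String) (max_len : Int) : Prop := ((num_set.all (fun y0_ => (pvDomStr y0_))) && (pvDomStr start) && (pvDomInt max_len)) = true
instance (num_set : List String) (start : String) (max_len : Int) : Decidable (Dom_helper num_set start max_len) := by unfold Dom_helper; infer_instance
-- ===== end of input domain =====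

-- B replaces A's re-exploring recursion by a bottom-up DP: set words are processed from the
-- longest length down, each word's best extension computed once from a table of finished
-- longer words (objective: alternative — a different, non-recursive algorithm of similar cost).

-- shared: the candidate order of the two nested for-loops (position i outer, letter ch inner),
-- and a bound on word lengths in the list, used only for A's termination
def pvLetters : List Char := ['a','b','c','d','e','f','g','h','i','j','k','l','m','n','o','p','q','r','s','t','u','v','w','x','y','z']
def pvCand (n : Nat) : List (Nat × Char) := (List.range (n+1)).flatMap (fun i => pvLetters.map (fun ch => (i, ch)))
def pvWbound (l : List String) : Nat := l.foldr (fun s m => max s.toList.length m) 0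

theorem pvWbound_mem {s : String} {l : List String} (h : s ∈ l) : s.toList.length ≤ pvWbound l := by
  induction l with
  | nil => cases h
  | cons a t ih =>
    rcases List.mem_cons.mp h with rfl | h
    · simp [pvWbound]
    · simp only [pvWbound, List.foldr] at ih ⊢
      exact le_trans (ih h) (le_max_right _ _)

-- start[:i] + ch + start[i:] for 0 ≤ i ≤ n is exactly take/drop (PySem.List.slice_to/from_natCast)
theorem pvIns_len (w : List Char) (i : Nat) (ch : Char) :
    (w.take i ++ ch :: w.drop i).length = w.length + 1 := by
  simp

theorem pvWbound_mem' {l : List String} {nw : List Char} (h : String.ofList nw ∈ l) :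
    nw.length ≤ pvWbound l := by simpa using pvWbound_mem h

theorem pvMeasure_lt {b ls ln : Nat} (h1 : ln ≤ b) (h2 : ln = ls + 1) :
    b + 1 - ln < b + 1 - ls := by omega

-- ===== PORT A ===== (strings ported on the List Char side; the two nested for-loops are one
-- fold over pvCand in the same order, written as the mutual recursion helperCore/helperLoop)
mutual
def helperCore (num_set : List String) (max_len : Int) (start : List Char) : Int × List Char :=
  if (start.length : Int) = max_len then ((start.length : Int), start)
  else helperLoop num_set max_len start (pvCand start.length) ((start.length : Int), start)
termination_by (pvWbound num_set + 1 - start.length, 1, 0)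
def helperLoop (num_set : List String) (max_len : Int) (start : List Char)
    (cs : List (Nat × Char)) (acc : Int × List Char) : Int × List Char :=
  match cs with
  | [] => acc
  | (i, ch) :: rest =>
    let nw := start.take i ++ ch :: start.drop i
    if h : String.ofList nw ∈ num_set then
      let r := helperCore num_set max_len nw
      helperLoop num_set max_len start rest (if r.1 > acc.1 then r else acc)
    else
      helperLoop num_set max_len start rest acc
termination_by (pvWbound num_set + 1 - start.length, 0, cs.length)
decreasing_by
  · exact Prod.Lex.left _ _ (pvMeasure_lt (pvWbound_mem' h) (pvIns_len start i ch))
  · exact Prod.Lex.right _ (Prod.Lex.right _ (Nat.lt_succ_self _))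
  · exact Prod.Lex.right _ (Prod.Lex.right _ (Nat.lt_succ_self _))
end

def helper (num_set : List String) (start : String) (max_len : Int) : Int × String :=
  let r := helperCore num_set max_len start.toList
  (r.1, String.ofList r.2)

-- ===== PORT B ===== (Source B: no recursion at all — folds building the DP table level by level)

-- range(a, b, -1) = [a, a-1, …, b+1]; ported by hand as a map over List.range, exact here
def pvRangeDesc (a b : Int) : List Int := (List.range (a - b).toNat).map (fun (j : Nat) => a - (j : Int))

-- _best in Source B: one pass over the candidates, reading finished values from the table.
-- table[nw] cannot miss when helper_alt calls this (longer words are already finished);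
-- the getD default only makes the Lean function total.
def bestB (words : List String) (max_len : Int)
    (table : PySem.Dict (List Char) (Int × List Char)) (w : List Char) : Int × List Char :=
  if (w.length : Int) = max_len then ((w.length : Int), w)
  else
    (pvCand w.length).foldl (fun best p =>
      let nw := w.take p.1 ++ p.2 :: w.drop p.1
      if String.ofList nw ∈ words then
        let r := (PySem.Dict.get? table nw).getD ((nw.length : Int), nw)
        if r.1 > best.1 then r else best
      else best) ((w.length : Int), w)

-- the inner 'for w in num_set: if len(w) == level: table[w] = _best(…)' loop
def levelB (num_set words : List String) (max_len : Int)
    (table : PySem.Dict (List Char) (Int × List Char)) (level : Int) :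
    PySem.Dict (List Char) (Int × List Char) :=
  num_set.foldl (fun t w =>
    if (w.toList.length : Int) = level then
      PySem.Dict.insert t w.toList (bestB words max_len t w.toList)
    else t) table

def helper_alt (num_set : List String) (start : String) (max_len : Int) : Int × String :=
  let words : PySem.Set String := PySem.Set.ofList num_set
  let top : Int := num_set.foldl (fun m w => max m (w.toList.length : Int)) 0
  let table := (pvRangeDesc top (start.toList.length : Int)).foldl
    (levelB num_set words max_len) PySem.Dict.empty
  let r := bestB words max_len table start.toList
  (r.1, String.ofList r.2)

-- ===== PRECONDITION & SPEC =====
def Spec_helper (num_set : List String) (start : String) (max_len : Int) (out : Int × String) : Prop := out = helper_alt num_set start max_len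
instance (num_set : List String) (start : String) (max_len : Int) (out : Int × String) : Decidable (Spec_helper num_set start max_len out) := by unfold Spec_helper; infer_instance

-- ===== CLAIM (what is proved, stated in full; the proofs are below) =====
def Claim_equal_helper : Prop := ∀ (num_set : List String) (start : String) (max_len : Int), Dom_helper num_set start max_len → Spec_helper num_set start max_len (helper num_set start max_len)

-- ===== LEMMAS AND PROOFS =====

theorem helperCore_eq (ns : List String) (ml : Int) (w : List Char) :
    helperCore ns ml w = if (w.length : Int) = ml then ((w.length : Int), w)
      else helperLoop ns ml w (pvCand w.length) ((w.length : Int), w) := by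
  rw [helperCore]

theorem helperLoop_nil (ns : List String) (ml : Int) (w : List Char) (acc : Int × List Char) :
    helperLoop ns ml w [] acc = acc := by rw [helperLoop]

theorem helperLoop_cons (ns : List String) (ml : Int) (w : List Char) (i : Nat) (ch : Char)
    (rest : List (Nat × Char)) (acc : Int × List Char) :
    helperLoop ns ml w ((i,ch) :: rest) acc =
      (if String.ofList (w.take i ++ ch :: w.drop i) ∈ ns then
        helperLoop ns ml w rest
          (if (helperCore ns ml (w.take i ++ ch :: w.drop i)).1 > acc.1 then
            helperCore ns ml (w.take i ++ ch :: w.drop i) else acc)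
      else helperLoop ns ml w rest acc) := by
  rw [helperLoop]
  by_cases h : String.ofList (w.take i ++ ch :: w.drop i) ∈ ns
  · simp only [dif_pos h, if_pos h]
  · simp only [dif_neg h, if_neg h]

-- invariants of the DP table: every entry is A's value, and every set word of length ≥ L is present
def TblCorrect (ns : List String) (ml : Int)
    (t : PySem.Dict (List Char) (Int × List Char)) : Prop :=
  ∀ (v : List Char) (r : Int × List Char), PySem.Dict.get? t v = some r → r = helperCore ns ml v

def TblPres (ns : List String) (L : Int)
    (t : PySem.Dict (List Char) (Int × List Char)) : Prop :=
  ∀ v : String, v ∈ ns → L ≤ (v.toList.length : Int) → (PySem.Dict.get? t v.toList).isSome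

theorem bestB_correct (ns : List String) (ml : Int)
    (t : PySem.Dict (List Char) (Int × List Char)) (w : List Char)
    (hc : TblCorrect ns ml t)
    (hp : ∀ v : String, v ∈ ns → v.toList.length = w.length + 1 → (PySem.Dict.get? t v.toList).isSome) :
    bestB (PySem.Set.ofList ns) ml t w = helperCore ns ml w := by
  rw [bestB, helperCore_eq]
  by_cases hl : (w.length : Int) = ml
  · rw [if_pos hl, if_pos hl]
  · rw [if_neg hl, if_neg hl]
    generalize ((w.length : Int), w) = acc
    induction pvCand w.length generalizing acc with
    | nil => rw [helperLoop_nil, List.foldl_nil]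
    | cons p rest ih =>
      obtain ⟨i, ch⟩ := p
      rw [helperLoop_cons, List.foldl_cons]
      by_cases h : String.ofList (w.take i ++ ch :: w.drop i) ∈ ns
      · have hmem : String.ofList (w.take i ++ ch :: w.drop i) ∈ PySem.Set.ofList ns :=
          (PySem.Set.mem_ofList ns _).mpr h
        have hsome := hp _ h (by simp)
        simp only [String.toList_ofList] at hsome
        obtain ⟨r, hr⟩ := Option.isSome_iff_exists.mp hsome
        simp only [hmem, if_true, hr, Option.getD_some, hc _ _ hr, if_pos h]
        exact ih _
      · have hmem : String.ofList (w.take i ++ ch :: w.drop i) ∉ PySem.Set.ofList ns :=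
          fun hx => h ((PySem.Set.mem_ofList ns _).mp hx)
        simp only [hmem, if_false, if_neg h]
        exact ih _
  
theorem levelB_fold_inv (ns : List String) (ml L : Int) (l : List String) :
    ∀ (t : PySem.Dict (List Char) (Int × List Char)),
      TblCorrect ns ml t → TblPres ns (L + 1) t →
      TblCorrect ns ml (l.foldl (fun t w =>
          if (w.toList.length : Int) = L then
            PySem.Dict.insert t w.toList (bestB (PySem.Set.ofList ns) ml t w.toList)
          else t) t) ∧
      TblPres ns (L + 1) (l.foldl (fun t w =>
          if (w.toList.length : Int) = L then
            PySem.Dict.insert t w.toList (bestB (PySem.Set.ofList ns) ml t w.toList)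
          else t) t) ∧
      (∀ k, (PySem.Dict.get? t k).isSome →
        (PySem.Dict.get? (l.foldl (fun t w =>
          if (w.toList.length : Int) = L then
            PySem.Dict.insert t w.toList (bestB (PySem.Set.ofList ns) ml t w.toList)
          else t) t) k).isSome) ∧
      (∀ v : String, v ∈ l → (v.toList.length : Int) = L →
        (PySem.Dict.get? (l.foldl (fun t w =>
          if (w.toList.length : Int) = L then
            PySem.Dict.insert t w.toList (bestB (PySem.Set.ofList ns) ml t w.toList)
          else t) t) v.toList).isSome) := by
  induction l with
  | nil =>
    intro t hc hp
    exact ⟨hc, hp, fun k hk => hk, fun v hv => absurd hv (List.not_mem_nil)⟩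
  | cons w rest ih =>
    intro t hc hp
    simp only [List.foldl_cons]
    by_cases hw : (w.toList.length : Int) = L
    · rw [if_pos hw]
      set val := bestB (PySem.Set.ofList ns) ml t w.toList with hval
      have hvcore : val = helperCore ns ml w.toList := by
        refine bestB_correct ns ml t w.toList hc (fun v hv hl => hp v hv ?_)
        rw [hl]; push_cast; omega
      have hc' : TblCorrect ns ml (PySem.Dict.insert t w.toList val) := by
        intro v r hr
        rw [PySem.Dict.get?_insert] at hr
        split at hr
        · next hvk => subst hvk; cases hr; exact hvcore
        · exact hc v r hr
      have hmono : ∀ k, (PySem.Dict.get? t k).isSome →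
          (PySem.Dict.get? (PySem.Dict.insert t w.toList val) k).isSome := by
        intro k hk
        rw [PySem.Dict.get?_insert]
        split
        · rfl
        · exact hk
      have hp' : TblPres ns (L + 1) (PySem.Dict.insert t w.toList val) :=
        fun v hv hl => hmono _ (hp v hv hl)
      obtain ⟨ic, ip, im, il⟩ := ih _ hc' hp'
      refine ⟨ic, ip, fun k hk => im k (hmono k hk), ?_⟩
      intro v hv hvl
      rcases List.mem_cons.mp hv with rfl | hv
      · refine im _ ?_
        rw [PySem.Dict.get?_insert, if_pos rfl]
        rfl
      · exact il v hv hvl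
    · rw [if_neg hw]
      obtain ⟨ic, ip, im, il⟩ := ih _ hc hp
      refine ⟨ic, ip, im, ?_⟩
      intro v hv hvl
      rcases List.mem_cons.mp hv with rfl | hv
      · exact absurd hvl hw
      · exact il v hv hvl

theorem levelB_inv (ns : List String) (ml L : Int)
    (t : PySem.Dict (List Char) (Int × List Char))
    (hc : TblCorrect ns ml t) (hp : TblPres ns (L + 1) t) :
    TblCorrect ns ml (levelB ns (PySem.Set.ofList ns) ml t L) ∧
    TblPres ns L (levelB ns (PySem.Set.ofList ns) ml t L) := by
  obtain ⟨ic, ip, _, il⟩ := levelB_fold_inv ns ml L ns t hc hp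
  refine ⟨ic, ?_⟩
  intro v hv hl
  by_cases he : (v.toList.length : Int) = L
  · exact il v hv he
  · exact ip v hv (by omega)

theorem pvRangeDesc_succ (a : Int) (k : Nat) :
    pvRangeDesc a (a - (k + 1 : Nat)) = pvRangeDesc a (a - k) ++ [a - k] := by
  unfold pvRangeDesc
  have h1 : (a - (a - (k + 1 : Nat))).toNat = k + 1 := by push_cast; omega
  have h2 : (a - (a - (k : Nat))).toNat = k := by omega
  rw [h1, h2, List.range_succ, List.map_append, List.map_singleton]

theorem rangeDesc_aux (ns : List String) (ml top : Int)
    (htop : ∀ v : String, v ∈ ns → (v.toList.length : Int) ≤ top) :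
    ∀ k : Nat,
      TblCorrect ns ml ((pvRangeDesc top (top - k)).foldl (levelB ns (PySem.Set.ofList ns) ml) PySem.Dict.empty) ∧
      TblPres ns (top - k + 1) ((pvRangeDesc top (top - k)).foldl (levelB ns (PySem.Set.ofList ns) ml) PySem.Dict.empty) := by
  intro k
  induction k with
  | zero =>
    have h0 : pvRangeDesc top (top - (0:Nat)) = [] := by
      unfold pvRangeDesc
      have : (top - (top - (0:Nat))).toNat = 0 := by omega
      rw [this, List.range_zero, List.map_nil]
    rw [h0, List.foldl_nil]
    constructor
    · intro v r hr
      rw [PySem.Dict.get?_empty] at hr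
      cases hr
    · intro v hv hl
      have := htop v hv
      push_cast at hl
      omega
  | succ k ih =>
    rw [pvRangeDesc_succ, List.foldl_append, List.foldl_cons, List.foldl_nil]
    obtain ⟨ic, ip⟩ := ih
    have := levelB_inv ns ml (top - k) _ ic ip
    refine ⟨this.1, ?_⟩
    have he : top - ((k:Nat) + 1 : Nat) + 1 = top - (k:Int) := by push_cast; ring
    rw [he]
    exact this.2

theorem rangeDesc_inv (ns : List String) (ml top b : Int)
    (htop : ∀ v : String, v ∈ ns → (v.toList.length : Int) ≤ top) :
    TblCorrect ns ml ((pvRangeDesc top b).foldl (levelB ns (PySem.Set.ofList ns) ml) PySem.Dict.empty) ∧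
    TblPres ns (b + 1) ((pvRangeDesc top b).foldl (levelB ns (PySem.Set.ofList ns) ml) PySem.Dict.empty) := by
  by_cases hb : b ≤ top
  · have hk : b = top - ((top - b).toNat : Nat) := by omega
    obtain ⟨ic, ip⟩ := rangeDesc_aux ns ml top htop (top - b).toNat
    rw [hk]
    exact ⟨ic, ip⟩
  · have h0 : pvRangeDesc top b = [] := by
      unfold pvRangeDesc
      have : (top - b).toNat = 0 := by omega
      rw [this, List.range_zero, List.map_nil]
    rw [h0, List.foldl_nil]
    constructor
    · intro v r hr
      rw [PySem.Dict.get?_empty] at hr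
      cases hr
    · intro v hv hl
      have := htop v hv
      omega

theorem foldl_max_init_le (t : List String) :
    ∀ m : Int, m ≤ t.foldl (fun m w => max m (w.toList.length : Int)) m := by
  induction t with
  | nil => intro m; simp
  | cons b u ih =>
    intro m
    rw [List.foldl_cons]
    exact le_trans (le_max_left _ _) (ih _)

theorem pvTop_bound_aux (l : List String) (v : String) (h : v ∈ l) :
    ∀ m : Int, (v.toList.length : Int) ≤ l.foldl (fun m w => max m (w.toList.length : Int)) m := by
  induction l with
  | nil => cases h
  | cons a t ih =>
    intro m
    rw [List.foldl_cons]
    rcases List.mem_cons.mp h with rfl | h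
    · exact le_trans (le_max_right _ _) (foldl_max_init_le t _)
    · exact ih h _

theorem pvTop_bound (ns : List String) (v : String) (h : v ∈ ns) :
    (v.toList.length : Int) ≤ ns.foldl (fun m w => max m (w.toList.length : Int)) 0 :=
  pvTop_bound_aux ns v h 0

-- ===== VERDICT (by name: the statement is the Claim_ definition above) =====
theorem helper_spec : Claim_equal_helper := by
  unfold Claim_equal_helper
  intro ns start ml _hdom
  simp only [Spec_helper, helper, helper_alt]
  obtain ⟨hc, hp⟩ := rangeDesc_inv ns ml (ns.foldl (fun m w => max m (w.toList.length : Int)) 0)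
    (start.toList.length : Int) (fun v hv => pvTop_bound ns v hv)
  rw [bestB_correct ns ml _ start.toList hc
    (fun v hv hl => hp v hv (by omega))]
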